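-- pv_equiv track=rewrite | github.com/EmoryHuang/myLeetCode | Solution/1694.重新格式化电话号码/1694.重新格式化电话号码.py | reformatNumber
-- ===== SOURCE A (Python) =====
-- def reformatNumber(number: str) -> str:
--     nums = [i for i in number if i.isdigit()]
--     ans = []
--     n, idx = len(nums), 0
--     while n:
--         if n > 4:
--             ans.append(''.join(nums[idx:idx + 3]))
--             idx += 3
--             n -= 3
--         else:
--             if n == 4:
--                 ans.append(''.join(nums[idx:idx + 2]))
--                 ans.append(''.join(nums[idx + 2:idx + 4]))
--             else:
--                 ans.append(''.join(nums[idx:idx + n]))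
--             break
--     return '-'.join(ans)
-- ===== SOURCE B (Python) =====
-- def reformatNumber(number: str) -> str:
--     s = ''.join(c for c in number if c.isdigit())
--     n = len(s)
--     if n < 2:
--         return s
--     q, rem = divmod(n, 3)
--     if rem == 0:
--         sizes = [3] * q
--     elif rem == 2:
--         sizes = [3] * q + [2]
--     else:
--         sizes = [3] * (q - 1) + [2, 2]
--     parts = []
--     for k in sizes:
--         parts.append(s[:k])
--         s = s[k:]
--     return '-'.join(parts)
-- ===== Notes on version B (the rewrite author's own statement) =====
-- stated objective: alternative
-- what changed: Replaces A's stateful while-loop over an index with explicit 4/==4 branching by a closed-form divmod(n,3) computation of the group-size list, then a single pass cutting slices of that size off the digit string.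
import Mathlib
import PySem

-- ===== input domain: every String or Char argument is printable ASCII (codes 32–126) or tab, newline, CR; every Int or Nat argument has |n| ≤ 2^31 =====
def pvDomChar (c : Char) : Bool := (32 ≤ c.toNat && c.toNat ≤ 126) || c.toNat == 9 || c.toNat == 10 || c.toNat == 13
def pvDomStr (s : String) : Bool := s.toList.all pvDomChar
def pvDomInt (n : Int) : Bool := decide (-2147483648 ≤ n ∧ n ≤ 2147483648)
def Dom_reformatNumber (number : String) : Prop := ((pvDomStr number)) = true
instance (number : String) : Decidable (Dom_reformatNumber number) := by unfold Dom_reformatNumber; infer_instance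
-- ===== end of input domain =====

-- B replaces A's stateful while-loop (index + explicit >4 / ==4 branching) by a closed-form
-- divmod-derived list of group sizes followed by a single slicing pass (objective: alternative).


-- ===== PORT A =====
-- A's while-loop: state is (n, idx, ans); n strictly decreases.
def reformatNumberGo (nums : List Char) (n idx : Nat) (ans : List String) : List String :=
  if n = 0 then ans
  else if 4 < n then
    reformatNumberGo nums (n - 3) (idx + 3)
      (ans ++ [String.ofList (PySem.List.slice nums (some (idx : Int)) (some ((idx : Int) + 3)))])
  else if n = 4 then
    ans ++ [String.ofList (PySem.List.slice nums (some (idx : Int)) (some ((idx : Int) + 2))),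
            String.ofList (PySem.List.slice nums (some ((idx : Int) + 2)) (some ((idx : Int) + 4)))]
  else
    ans ++ [String.ofList (PySem.List.slice nums (some (idx : Int)) (some ((idx : Int) + (n : Int))))]
termination_by n

def reformatNumber (number : String) : String :=
  let nums := number.toList.filter (fun c => PySem.Chars.isdigit c)
  PySem.Str.join "-" (reformatNumberGo nums nums.length 0 [])

-- ===== PORT B =====
-- the 'for k in sizes' loop of Source B: cut a prefix of size k off s, keep the rest
def reformatNumberCut : List Char → List Nat → List String
  | _, [] => []
  | s, k :: ks =>
      String.ofList (PySem.List.slice s none (some (k : Int))) ::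
        reformatNumberCut (PySem.List.slice s (some (k : Int)) none) ks

def reformatNumber_alt (number : String) : String :=
  let s := number.toList.filter (fun c => PySem.Chars.isdigit c)
  let n := s.length
  if n < 2 then String.ofList s
  else
    let q := n / 3
    let rem := n % 3
    let sizes := if rem = 0 then List.replicate q 3
                 else if rem = 2 then List.replicate q 3 ++ [2]
                 else List.replicate (q - 1) 3 ++ [2, 2]
    PySem.Str.join "-" (reformatNumberCut s sizes)

-- ===== PRECONDITION & SPEC =====
def Spec_reformatNumber (number : String) (out : String) : Prop := out = reformatNumber_alt number
instance (number : String) (out : String) : Decidable (Spec_reformatNumber number out) := by unfold Spec_reformatNumber; infer_instance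

-- ===== CLAIM (what is proved, stated in full; the proofs are below) =====
def Claim_equal_reformatNumber : Prop := ∀ (number : String), Dom_reformatNumber number → Spec_reformatNumber number (reformatNumber number)

-- ===== LEMMAS AND PROOFS =====

-- common reference grouping: groups of 3 while more than 4 digits remain, then 4 → 2+2, else one group
def specG (l : List Char) : List String :=
  if 4 < l.length then String.ofList (l.take 3) :: specG (l.drop 3)
  else if l.length = 4 then [String.ofList (l.take 2), String.ofList (l.drop 2)]
  else if l.length = 0 then [] else [String.ofList l]
termination_by l.length
decreasing_by simp [List.length_drop]; omega

theorem specG_nil : specG [] = [] := by rw [specG]; simp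

theorem specG_gt4 (l : List Char) (h : 4 < l.length) :
    specG l = String.ofList (l.take 3) :: specG (l.drop 3) := by
  rw [specG]; simp [h]

theorem specG_eq4 (l : List Char) (h : l.length = 4) :
    specG l = [String.ofList (l.take 2), String.ofList (l.drop 2)] := by
  rw [specG]; simp [h]

theorem specG_le3 (l : List Char) (h0 : l ≠ []) (h : l.length ≤ 3) :
    specG l = [String.ofList l] := by
  rw [specG]
  have : l.length ≠ 0 := by simpa using h0
  simp only [if_neg (by omega : ¬ 4 < l.length), if_neg (by omega : ¬ l.length = 4),
    if_neg this]

theorem goA_eq_specG (nums : List Char) :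
    ∀ k idx ans, idx + k = nums.length →
      reformatNumberGo nums k idx ans = ans ++ specG (nums.drop idx) := by
  intro k
  induction k using Nat.strong_induction_on with
  | _ k ih =>
    intro idx ans hlen
    have hdl : (nums.drop idx).length = k := by simp [List.length_drop]; omega
    rw [reformatNumberGo]
    by_cases h0 : k = 0
    · subst h0
      have : nums.drop idx = [] := List.eq_nil_of_length_eq_zero hdl
      simp [this, specG_nil]
    · simp only [h0, if_false]
      by_cases h4 : 4 < k
      · simp only [h4, if_true]
        rw [PySem.List.slice_toNat nums (by positivity) (by positivity)]
        rw [show ((idx : Int)).toNat = idx by omega,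
            show ((idx : Int) + 3).toNat = idx + 3 by omega,
            show idx + 3 - idx = 3 by omega]
        rw [ih (k - 3) (by omega) (idx + 3) _ (by omega)]
        rw [specG_gt4 (nums.drop idx) (by omega)]
        rw [List.drop_drop]
        simp
      · simp only [h4, if_false]
        by_cases he4 : k = 4
        · subst he4
          simp only [if_true]
          rw [PySem.List.slice_toNat nums (a := (idx : Int)) (by positivity) (by positivity),
              PySem.List.slice_toNat nums (a := (idx : Int) + 2) (by positivity) (by positivity)]
          rw [show ((idx : Int)).toNat = idx by omega,
              show ((idx : Int) + 2).toNat = idx + 2 by omega,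
              show ((idx : Int) + 4).toNat = idx + 4 by omega,
              show idx + 2 - idx = 2 by omega,
              show idx + 4 - (idx + 2) = 2 by omega]
          rw [specG_eq4 (nums.drop idx) hdl]
          have hdd : (nums.drop (idx + 2)).take 2 = nums.drop (idx + 2) :=
            List.take_of_length_le (by simp [List.length_drop]; omega)
          rw [hdd, show nums.drop (idx + 2) = (nums.drop idx).drop 2 from by
            rw [List.drop_drop]]
        · simp only [he4, if_false]
          rw [PySem.List.slice_toNat nums (by positivity) (by positivity)]
          rw [show ((idx : Int)).toNat = idx by omega,
              show ((idx : Int) + (k : Int)).toNat = idx + k by omega,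
              show idx + k - idx = k by omega]
          rw [List.take_of_length_le (by omega)]
          rw [specG_le3 (nums.drop idx) (by intro h; rw [h] at hdl; simp at hdl; omega)
            (by omega)]

theorem cut_cons (s : List Char) (k : Nat) (ks : List Nat) :
    reformatNumberCut s (k :: ks) =
      String.ofList (s.take k) :: reformatNumberCut (s.drop k) ks := by
  rw [reformatNumberCut,
      PySem.List.slice_to s (by positivity),
      PySem.List.slice_from s (by positivity)]
  simp

theorem cut_eq_specG : ∀ n (l : List Char), l.length = n → 2 ≤ n →
    reformatNumberCut l
      (if n % 3 = 0 then List.replicate (n / 3) 3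
       else if n % 3 = 2 then List.replicate (n / 3) 3 ++ [2]
       else List.replicate (n / 3 - 1) 3 ++ [2, 2]) = specG l := by
  intro n
  induction n using Nat.strong_induction_on with
  | _ n ih =>
    intro l hl h2
    by_cases h4 : 4 < n
    · -- the size list starts with a 3 in every residue class
      have hstep :
          (if n % 3 = 0 then List.replicate (n / 3) 3
           else if n % 3 = 2 then List.replicate (n / 3) 3 ++ [2]
           else List.replicate (n / 3 - 1) 3 ++ [2, 2]) =
          3 :: (if (n - 3) % 3 = 0 then List.replicate ((n - 3) / 3) 3
                else if (n - 3) % 3 = 2 then List.replicate ((n - 3) / 3) 3 ++ [2]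
                else List.replicate ((n - 3) / 3 - 1) 3 ++ [2, 2]) := by
        have hm : (n - 3) % 3 = n % 3 := by omega
        have hd : (n - 3) / 3 = n / 3 - 1 := by omega
        rw [hm, hd]
        rcases (show n % 3 = 0 ∨ n % 3 = 1 ∨ n % 3 = 2 by omega) with h | h | h
        · have hr : List.replicate (n / 3) 3 = 3 :: List.replicate (n / 3 - 1) 3 := by
            rw [show n / 3 = (n / 3 - 1) + 1 by omega, List.replicate_succ]
            simp
          simp [h, hr]
        · have hr : List.replicate (n / 3 - 1) 3 = 3 :: List.replicate (n / 3 - 1 - 1) 3 := by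
            rw [show n / 3 - 1 = (n / 3 - 1 - 1) + 1 by omega, List.replicate_succ]
            simp
          simp [h, hr]
        · have hr : List.replicate (n / 3) 3 = 3 :: List.replicate (n / 3 - 1) 3 := by
            rw [show n / 3 = (n / 3 - 1) + 1 by omega, List.replicate_succ]
            simp
          simp [h, hr]
      rw [hstep, cut_cons,
          ih (n - 3) (by omega) (l.drop 3) (by simp [List.length_drop]; omega) (by omega),
          specG_gt4 l (by omega)]
    · interval_cases n
      · -- n = 2 : sizes = [2]
        norm_num
        rw [cut_cons, reformatNumberCut,
            List.take_of_length_le (by omega),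
            specG_le3 l (by rintro rfl; simp at hl) (by omega)]
      · -- n = 3 : sizes = [3]
        norm_num [List.replicate]
        rw [cut_cons, reformatNumberCut,
            List.take_of_length_le (by omega),
            specG_le3 l (by rintro rfl; simp at hl) (by omega)]
      · -- n = 4 : sizes = [2, 2]
        norm_num [List.replicate]
        rw [cut_cons, cut_cons, reformatNumberCut,
            List.take_of_length_le (l := l.drop 2) (by simp [List.length_drop]; omega),
            specG_eq4 l hl]

-- ===== VERDICT (by name: the statement is the Claim_ definition above) =====
theorem reformatNumber_spec : Claim_equal_reformatNumber := by
  intro number _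
  unfold Spec_reformatNumber reformatNumber reformatNumber_alt
  dsimp only
  set l := number.toList.filter (fun c => PySem.Chars.isdigit c) with hl
  have hgo := goA_eq_specG l l.length 0 [] (by omega)
  simp only [List.drop_zero, List.nil_append] at hgo
  rw [hgo]
  by_cases h2 : l.length < 2
  · rw [if_pos h2]
    interval_cases h : l.length
    · have : l = [] := List.eq_nil_of_length_eq_zero h
      rw [this, specG_nil]
      rfl
    · rw [specG_le3 l (by intro hh; rw [hh] at h; simp at h) (by omega)]
      simp [PySem.Str.join, PySem.Chars.join_singleton]
  · rw [if_neg h2]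
    rw [cut_eq_specG l.length l rfl (by omega)]
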